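-- pv_equiv track=rewrite | github.com/miliar/Code_Jam_Webscraper | solutions_python/solutions_year16_round1_nr1/1264.py | findlastword
-- ===== SOURCE A (Python) =====
-- def findlastword(s):
--     lastwordlist = [s[0]]
--     for i in range(1, len(s)):
--         if s[i] >= lastwordlist[0]:
--             lastwordlist.insert(0, s[i])
--         else:
--             lastwordlist.append(s[i])
--     return ''.join(lastwordlist)
-- ===== SOURCE B (Python) =====
-- def findlastword(s):
--     front = [c for i, c in enumerate(s) if all(c >= d for d in s[:i])]
--     back = [c for i, c in enumerate(s) if any(c < d for d in s[:i])]
--     return ''.join(reversed(front)) + ''.join(back)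
-- ===== Notes on version B (the rewrite author's own statement) =====
-- stated objective: alternative
-- what changed: Replaces A's stateful loop (insert-at-front/append on one list, comparing each char with the list's current front) with a stateless quantifier characterization: a char belongs to the reversed front part iff it is >= every earlier char of s, computed by two list comprehensions over enumerate(s) and assembled as reverse(front)+back.
import Mathlib
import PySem

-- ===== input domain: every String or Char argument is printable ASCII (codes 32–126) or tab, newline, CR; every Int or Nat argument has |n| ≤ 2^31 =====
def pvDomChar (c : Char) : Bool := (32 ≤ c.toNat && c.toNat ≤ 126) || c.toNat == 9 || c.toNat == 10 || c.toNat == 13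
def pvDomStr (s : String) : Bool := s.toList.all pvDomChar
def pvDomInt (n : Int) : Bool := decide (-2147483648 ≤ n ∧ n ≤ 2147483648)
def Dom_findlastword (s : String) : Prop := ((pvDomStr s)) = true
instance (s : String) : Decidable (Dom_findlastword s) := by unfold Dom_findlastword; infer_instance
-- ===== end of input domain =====

-- B replaces A's stateful insert-at-front/append loop by a stateless characterization:
-- a char goes to the (reversed) front part iff it is >= every earlier char (objective: alternative).

-- ===== PORT A =====
-- one loop step: compare s[i] with lastwordlist[0], prepend or append
def findlastword (s : String) : String :=
  match s.toList with
  | [] => ""   -- Python raises IndexError on s[0]; excluded by Pre_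
  | c :: rest =>
    String.ofList (rest.foldl (fun lw x => if lw.head! ≤ x then x :: lw else lw ++ [x]) [c])

-- ===== PORT B =====
-- two comprehensions over enumerate(s); the slice s[:i] with 0 ≤ i ≤ len s is exactly List.take i
def findlastword_alt (s : String) : String :=
  let cs := s.toList
  let front := ((PySem.List.enumerate cs).filter
      (fun p => (cs.take p.1.toNat).all (fun d => decide (d ≤ p.2)))).map (·.2)
  let back := ((PySem.List.enumerate cs).filter
      (fun p => (cs.take p.1.toNat).any (fun d => decide (p.2 < d)))).map (·.2)
  String.ofList (front.reverse ++ back)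

-- ===== PRECONDITION & SPEC =====
-- Pre_ excludes only the empty string, on which A raises IndexError at s[0].
def Pre_findlastword (s : String) : Prop := s ≠ ""
instance (s : String) : Decidable (Pre_findlastword s) := by unfold Pre_findlastword; infer_instance
def pvWitness_findlastword : String := "cab"

def Spec_findlastword (s : String) (out : String) : Prop := out = findlastword_alt s
instance (s : String) (out : String) : Decidable (Spec_findlastword s out) := by unfold Spec_findlastword; infer_instance

-- ===== CLAIM (what is proved, stated in full; the proofs are below) =====
def Claim_equal_findlastword : Prop := ∀ (s : String), Dom_findlastword s → Pre_findlastword s → Spec_findlastword s (findlastword s)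

-- ===== LEMMAS AND PROOFS =====

-- proof-only names for B's two comprehensions
def pvFront (cs : List Char) : List Char :=
  ((PySem.List.enumerate cs).filter
      (fun p => (cs.take p.1.toNat).all (fun d => decide (d ≤ p.2)))).map (·.2)
def pvBack (cs : List Char) : List Char :=
  ((PySem.List.enumerate cs).filter
      (fun p => (cs.take p.1.toNat).any (fun d => decide (p.2 < d)))).map (·.2)

theorem pv_alt_eq (s : String) :
    findlastword_alt s = String.ofList ((pvFront s.toList).reverse ++ pvBack s.toList) := rfl

-- snoc characterization of the two comprehensions
theorem pvFront_snoc (p : List Char) (x : Char) :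
    pvFront (p ++ [x]) = pvFront p ++ (if p.all (fun d => decide (d ≤ x)) then [x] else []) := by
  unfold pvFront
  rw [PySem.List.enumerate_append, List.filter_append, List.map_append]
  congr 1
  · congr 1
    apply List.filter_congr
    intro a ha
    rcases (PySem.List.mem_enumerate_iff _ _ _).1 ha with ⟨k, hk, rfl⟩
    have h1 : ((0 : Int) + k).toNat = k := by omega
    rw [h1, List.take_append_of_le_length (le_of_lt hk)]
  · rw [PySem.List.enumerate_cons, PySem.List.enumerate_nil]
    have h1 : ((0 : Int) + p.length).toNat = p.length := by omega
    simp only [List.filter_cons, List.filter_nil, h1, List.take_left]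
    by_cases hall : p.all (fun d => decide (d ≤ x)) = true
    · simp [hall]
    · simp [hall]

theorem pvBack_snoc (p : List Char) (x : Char) :
    pvBack (p ++ [x]) = pvBack p ++ (if p.all (fun d => decide (d ≤ x)) then [] else [x]) := by
  unfold pvBack
  rw [PySem.List.enumerate_append, List.filter_append, List.map_append]
  congr 1
  · congr 1
    apply List.filter_congr
    intro a ha
    rcases (PySem.List.mem_enumerate_iff _ _ _).1 ha with ⟨k, hk, rfl⟩
    have h1 : ((0 : Int) + k).toNat = k := by omega
    rw [h1, List.take_append_of_le_length (le_of_lt hk)]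
  · rw [PySem.List.enumerate_cons, PySem.List.enumerate_nil]
    have h1 : ((0 : Int) + p.length).toNat = p.length := by omega
    simp only [List.filter_cons, List.filter_nil, h1, List.take_left]
    have hna : p.any (fun d => decide (x < d)) = !p.all (fun d => decide (d ≤ x)) := by
      rw [List.any_eq_not_all_not]
      have h2 : (fun d : Char => !decide (x < d)) = (fun d => decide (d ≤ x)) :=
        funext fun d => by simp [← decide_not, not_lt]
      rw [h2]
    rw [hna]
    by_cases hall : p.all (fun d => decide (d ≤ x)) = true
    · simp [hall]
    · simp [hall]

-- the last element of the front part is a maximum of the prefix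
theorem pvFront_last (p : List Char) (hp : p ≠ []) :
    ∃ m, (pvFront p).getLast? = some m ∧ m ∈ p ∧ ∀ d ∈ p, d ≤ m := by
  induction p using List.reverseRecOn with
  | nil => exact absurd rfl hp
  | append_singleton p' x ih =>
    rw [pvFront_snoc]
    by_cases hall : p'.all (fun d => decide (d ≤ x)) = true
    · refine ⟨x, ?_, by simp, ?_⟩
      · simp [hall]
      · intro d hd
        rcases List.mem_append.1 hd with hd | hd
        · simpa using (List.all_eq_true.1 hall) d hd
        · simp at hd; simp [hd]
    · have hp' : p' ≠ [] := by
        rintro rfl; simp at hall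
      rcases ih hp' with ⟨m, hlast, hmem, hmax⟩
      refine ⟨m, ?_, List.mem_append_left _ hmem, ?_⟩
      · simpa [hall] using hlast
      · simp only [List.all_eq_true, decide_eq_true_eq, not_forall] at hall
        rcases hall with ⟨d, hd, hdx⟩
        intro e he
        rcases List.mem_append.1 he with he | he
        · exact hmax e he
        · simp at he; subst he
          exact le_of_lt (lt_of_lt_of_le (lt_of_not_ge hdx) (hmax d hd))

-- loop invariant: A's list state after a nonempty prefix p is (pvFront p).reverse ++ pvBack p
theorem pv_inv (rest : List Char) (p : List Char) (hp : p ≠ []) :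
    rest.foldl (fun lw x => if lw.head! ≤ x then x :: lw else lw ++ [x])
        ((pvFront p).reverse ++ pvBack p)
      = (pvFront (p ++ rest)).reverse ++ pvBack (p ++ rest) := by
  induction rest generalizing p with
  | nil => simp
  | cons x xs ih =>
    rcases pvFront_last p hp with ⟨m, hlast, hmem, hmax⟩
    have hne : pvFront p ≠ [] := by
      intro h; rw [h] at hlast; simp at hlast
    have hhead : ((pvFront p).reverse ++ pvBack p).head! = m := by
      have h1 : ((pvFront p).reverse ++ pvBack p).head? = some m := by
        rw [List.head?_append_of_ne_nil, List.head?_reverse]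
        · exact hlast
        · simpa using hne
      cases h3 : (pvFront p).reverse ++ pvBack p with
      | nil => simp [h3] at h1
      | cons a t => rw [h3] at h1; simpa using h1
    simp only [List.foldl_cons, hhead]
    by_cases hall : p.all (fun d => decide (d ≤ x)) = true
    · have hmx : m ≤ x := by simpa using (List.all_eq_true.1 hall) m hmem
      rw [if_pos hmx]
      have hst : x :: ((pvFront p).reverse ++ pvBack p)
          = (pvFront (p ++ [x])).reverse ++ pvBack (p ++ [x]) := by
        rw [pvFront_snoc, pvBack_snoc, if_pos hall, if_pos hall]
        simp
      rw [hst, ih (p ++ [x]) (by simp)]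
      simp
    · have hmx : ¬ m ≤ x := by
        simp only [List.all_eq_true, decide_eq_true_eq, not_forall] at hall
        rcases hall with ⟨d, hd, hdx⟩
        exact fun h => hdx (le_trans (hmax d hd) h)
      rw [if_neg hmx]
      have hall' : ¬ p.all (fun d => decide (d ≤ x)) = true := hall
      have hst : ((pvFront p).reverse ++ pvBack p) ++ [x]
          = (pvFront (p ++ [x])).reverse ++ pvBack (p ++ [x]) := by
        rw [pvFront_snoc, pvBack_snoc, if_neg hall', if_neg hall']
        simp
      rw [hst, ih (p ++ [x]) (by simp)]
      simp

theorem pvFront_singleton (c : Char) : pvFront [c] = [c] := by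
  simp [pvFront, PySem.List.enumerate_cons, PySem.List.enumerate_nil, List.filter]

theorem pvBack_singleton (c : Char) : pvBack [c] = [] := by
  simp [pvBack, PySem.List.enumerate_cons, PySem.List.enumerate_nil, List.filter]

-- ===== VERDICT (by name: the statement is the Claim_ definition above) =====
theorem findlastword_spec : Claim_equal_findlastword := by
  intro s _ hpre
  unfold Spec_findlastword findlastword
  rw [pv_alt_eq]
  cases hcs : s.toList with
  | nil => exact absurd (by simpa using congrArg String.ofList hcs) hpre
  | cons c rest =>
    have h0 : [c] = (pvFront [c]).reverse ++ pvBack [c] := by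
      rw [pvFront_singleton, pvBack_singleton]; simp
    show String.ofList (rest.foldl (fun lw x => if lw.head! ≤ x then x :: lw else lw ++ [x]) [c]) = _
    rw [h0, pv_inv rest [c] (by simp)]
    simp
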